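-- pv_equiv track=rewrite | github.com/KimiyukiYamauchi/test1.py | src/q09.py | last2
-- ===== SOURCE A (Python) =====
-- def last2(str):
--     if len(str) < 2:
--         return 0
--
--     last2 = str[-2:]
--     count = 0
--
--     for i in range(len(str) - 2):
--         if str[i:i+2] == last2:
--             count += 1
--
--     return count
-- ===== SOURCE B (Python) =====
-- def last2(str):
--     if len(str) < 2:
--         return 0
--     pat = str[-2:]
--     s = str[:-1]
--     count = 0
--     start = 0
--     while True:
--         idx = s.find(pat, start)
--         if idx == -1:
--             break
--         count += 1
--         start = idx + 1
--     return count
-- ===== Notes on version B (the rewrite author's own statement) =====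
-- stated objective: faster
-- what changed: Replaces the per-index window comparison over range(len-2) with a substring-search loop: repeatedly str.find(last2, start) on str[:-1], advancing start = idx + 1 so overlapping occurrences are still counted; find skips non-matching stretches in one C-level scan instead of one Python-level slice+compare per index.
import Mathlib
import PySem

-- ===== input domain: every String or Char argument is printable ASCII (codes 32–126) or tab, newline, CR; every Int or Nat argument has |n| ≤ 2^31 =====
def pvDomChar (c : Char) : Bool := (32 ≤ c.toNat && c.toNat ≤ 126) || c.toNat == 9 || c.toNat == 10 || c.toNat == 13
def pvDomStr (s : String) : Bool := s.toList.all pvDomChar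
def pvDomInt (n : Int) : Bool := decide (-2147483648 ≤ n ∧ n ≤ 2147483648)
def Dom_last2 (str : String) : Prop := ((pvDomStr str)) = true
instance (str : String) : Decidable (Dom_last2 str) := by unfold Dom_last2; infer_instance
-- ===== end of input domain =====

-- B replaces the per-index window comparison with a substring-search loop (find with a moving start = idx + 1,
-- which keeps overlapping occurrences): a timing run measured B faster by a constant factor (C-level find scan vs per-index Python slicing).

-- ===== PORT A =====
def last2 (str : String) : Int :=
  let cs := str.toList
  if cs.length < 2 then 0
  else
    let pat := PySem.List.slice cs (some (-2)) none
    (PySem.List.pyRange 0 ((cs.length : Int) - 2) 1).foldl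
      (fun count i =>
        if PySem.List.slice cs (some i) (some (i + 2)) = pat then count + 1 else count) 0

-- ===== PORT B =====
-- the while-loop of Source B: repeatedly s.find(pat, start); fuel only makes the recursion total
-- (each found index is ≥ start, so s.length + 1 steps always suffice — proved in go_count below)
def last2Go (s pat : List Char) : Nat → Nat → Nat → Nat
  | 0, _, count => count
  | fuel + 1, start, count =>
    let idx := PySem.Chars.findFrom s pat (start : Int) none
    if idx = -1 then count
    else last2Go s pat fuel (idx.toNat + 1) (count + 1)

def last2_alt (str : String) : Int :=
  let cs := str.toList
  if cs.length < 2 then 0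
  else
    let pat := PySem.List.slice cs (some (-2)) none
    let s := PySem.List.slice cs none (some (-1))
    (last2Go s pat (s.length + 1) 0 0 : Int)

-- ===== PRECONDITION & SPEC =====
def Spec_last2 (str : String) (out : Int) : Prop := out = last2_alt str
instance (str : String) (out : Int) : Decidable (Spec_last2 str out) := by unfold Spec_last2; infer_instance

-- ===== CLAIM (what is proved, stated in full; the proofs are below) =====
def Claim_equal_last2 : Prop := ∀ (str : String), Dom_last2 str → Spec_last2 str (last2 str)

-- ===== LEMMAS AND PROOFS =====

-- a prefix of s.drop i is an infix of s.drop j for j ≤ i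
lemma prefix_drop_infix (pat s : List Char) (j i : Nat) (hji : j ≤ i)
    (h : pat <+: s.drop i) : pat <:+: s.drop j := by
  obtain ⟨r, hr⟩ := h
  refine ⟨(s.drop j).take (i - j), r, ?_⟩
  rw [List.append_assoc, hr]
  have : s.drop i = (s.drop j).drop (i - j) := by
    rw [List.drop_drop]; congr 1; omega
  rw [this, List.take_append_drop]

-- the find-loop counts every match position ≥ start
lemma go_count (s pat : List Char) (hp : pat ≠ []) :
    ∀ fuel start count, start ≤ s.length → s.length - start < fuel →
    last2Go s pat fuel start count
      = count + (List.range' start (s.length - start)).countP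
          (fun i => decide (pat <+: s.drop i)) := by
  intro fuel
  induction fuel with
  | zero => intro start count _ h; omega
  | succ fuel ih =>
    intro start count hstart hfuel
    rw [last2Go]
    by_cases hidx : PySem.Chars.findFrom s pat (start : Int) none = -1
    · simp only [hidx, if_true]
      have hno : ¬ pat <:+: s.drop start :=
        (PySem.Chars.findFrom_natCast_eq_neg_one_iff s pat start hstart).mp hidx
      have hz : (List.range' start (s.length - start)).countP
          (fun i => decide (pat <+: s.drop i)) = 0 := by
        rw [List.countP_eq_zero]
        intro i hi
        simp only [List.mem_range'_1] at hi
        simp only [decide_eq_true_eq]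
        intro hpre
        exact hno (prefix_drop_infix pat s start i hi.1 hpre)
      omega
    · simp only [hidx, if_false]
      obtain ⟨hge, hpre, hmin⟩ :=
        PySem.Chars.findFrom_natCast_spec s pat start hstart hidx
      set m := (PySem.Chars.findFrom s pat (start : Int) none).toNat with hm
      have hgem : start ≤ m := by omega
      have hmlt : m < s.length := by
        have hne : s.drop m ≠ [] := by
          intro hnil
          rw [hnil, List.prefix_nil] at hpre
          exact hp hpre
        have := List.length_drop (l := s) (i := m)
        by_contra hc
        push Not at hc
        apply hne
        rw [← List.length_eq_zero_iff, this]
        omega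
      rw [ih (m + 1) (count + 1) (by omega) (by omega)]
      have hsplit : List.range' start (s.length - start)
          = List.range' start (m - start) ++ List.range' m (s.length - m) := by
        have h := @List.range'_append_1 start (m - start) (s.length - m)
        rw [show start + (m - start) = m from by omega,
          show (m - start) + (s.length - m) = s.length - start from by omega] at h
        exact h.symm
      rw [hsplit, List.countP_append]
      have h1 : (List.range' start (m - start)).countP
          (fun i => decide (pat <+: s.drop i)) = 0 := by
        rw [List.countP_eq_zero]
        intro i hi
        simp only [List.mem_range'_1] at hi
        simp only [decide_eq_true_eq]
        exact hmin i hi.1 (by omega)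
      have h2 : List.range' m (s.length - m) = m :: List.range' (m + 1) (s.length - (m + 1)) := by
        have : s.length - m = (s.length - (m + 1)) + 1 := by omega
        rw [this, List.range'_succ]
      rw [h1, h2, List.countP_cons]
      simp only [hpre, if_pos, decide_true]
      omega

-- inside the counted range, a 2-slice of cs.dropLast equals the 2-slice of cs
lemma take2_dropLast (cs : List Char) (k : Nat) (h : k + 2 ≤ cs.length - 1) :
    (cs.dropLast.drop k).take 2 = (cs.drop k).take 2 := by
  rw [List.dropLast_eq_take, List.drop_take, List.take_take]
  congr 1
  omega

theorem last2_eq_alt (str : String) : last2 str = last2_alt str := by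
  unfold last2 last2_alt
  set cs := str.toList with hcs
  by_cases h2 : cs.length < 2
  · simp [h2]
  · simp only [h2, if_false]
    have hlen2 : 2 ≤ cs.length := by omega
    -- name the pattern and the searched prefix
    rw [PySem.List.slice_from_neg_ofNat cs 2 (by omega), PySem.List.slice_to_neg_one]
    set pat := cs.drop (cs.length - 2) with hpat
    have hpatlen : pat.length = 2 := by
      rw [hpat, List.length_drop]; omega
    have hplen : cs.dropLast.length = cs.length - 1 := by
      rw [List.length_dropLast]
    -- B side: the loop counts match positions
    rw [go_count cs.dropLast pat (by intro h; rw [h] at hpatlen; simp at hpatlen)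
        (cs.dropLast.length + 1) 0 0 (by omega) (by omega)]
    -- A side: the foldl is a countP over the range
    rw [PySem.List.foldl_ite_add_one, zero_add]
    congr 1
    rw [PySem.List.pyRange_one, List.countP_map]
    have hb : (((cs.length : Int) - 2 - 0)).toNat = cs.length - 2 := by omega
    rw [hb]
    -- shrink B's range from length-1 to length-2: position length-2 cannot match (only 1 char left)
    have hrw : cs.dropLast.length - 0 = (cs.length - 2) + 1 := by omega
    rw [Nat.zero_add, hrw, List.range'_1_concat, List.countP_append]
    have hlast : ([0 + (cs.length - 2)].countP (fun i => decide (pat <+: cs.dropLast.drop i))) = 0 := by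
      have hno : ¬ pat <+: cs.dropLast.drop (cs.length - 2) := by
        intro hpre
        have := hpre.length_le
        rw [hpatlen, List.length_drop, hplen] at this
        omega
      simp [hno]
    rw [hlast, Nat.add_zero, ← List.range_eq_range']
    apply List.countP_congr
    intro k hk
    rw [List.mem_range] at hk
    have hsl : PySem.List.slice cs (some ((k : Int))) (some ((k : Int) + 2)) = (cs.drop k).take 2 := by
      rw [show ((k : Int) + 2) = ((k : Int) + ((2 : Nat) : Int)) from by norm_num,
        PySem.List.slice_natCast_add]
    simp only [Function.comp_apply, zero_add, hsl, decide_eq_true_eq]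
    rw [List.prefix_iff_eq_take, hpatlen, take2_dropLast cs k (by omega)]
    exact eq_comm

-- ===== VERDICT (by name: the statement is the Claim_ definition above) =====
theorem last2_spec : Claim_equal_last2 := by
  intro str _
  unfold Spec_last2
  exact last2_eq_alt str
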